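-- pv_equiv track=rewrite | github.com/GunvantGMC/Competitive-Programing | MVPInArray.py | findMVP
-- ===== SOURCE A (Python) =====
-- def findMVP(n, A):
--     l = []
--     for i in range(0,n):
--         val = A[i]
--         for j in range(i,n):
--             if(val < A[j]):
--                 val = A[j]
--         if(val not in l):
--             l.append(val)
--     return l
-- ===== SOURCE B (Python) =====
-- def findMVP(n, A):
--     # One reverse pass: a value is an MVP iff it exceeds every element to its
--     # right within A[:n]; collect the running records right-to-left, then
--     # reverse to get first-appearance (left-to-right) order.
--     res = []
--     cur = None
--     for j in range(n - 1, -1, -1):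
--         x = A[j]
--         if cur is None or x > cur:
--             cur = x
--             res.append(x)
--     res.reverse()
--     return res
-- ===== Notes on version B (the rewrite author's own statement) =====
-- stated objective: faster
-- what changed: Replaces the nested suffix-max scan plus linear membership dedup with a single reverse pass collecting running right-to-left record maxima (then one reverse), exploiting that the suffix maxima are non-increasing so the distinct values are exactly the records.
import Mathlib
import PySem

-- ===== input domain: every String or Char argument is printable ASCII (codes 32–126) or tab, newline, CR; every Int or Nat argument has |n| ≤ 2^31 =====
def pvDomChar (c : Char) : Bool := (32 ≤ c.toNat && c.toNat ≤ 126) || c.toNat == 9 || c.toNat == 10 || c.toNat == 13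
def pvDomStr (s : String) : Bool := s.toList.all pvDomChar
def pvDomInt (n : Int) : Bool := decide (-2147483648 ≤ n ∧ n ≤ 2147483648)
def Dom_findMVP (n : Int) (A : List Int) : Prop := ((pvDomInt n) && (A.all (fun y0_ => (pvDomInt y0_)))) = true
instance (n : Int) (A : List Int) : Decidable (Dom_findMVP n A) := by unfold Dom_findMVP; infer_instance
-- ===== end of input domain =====

-- B replaces A's O(n^2) nested suffix-max scans by one O(n) reverse pass over
-- running record maxima; equivalence is proved on all inputs where A returns.

-- ===== PORT A =====
def findMVP (n : Int) (A : List Int) : List Int :=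
  (PySem.List.pyRange 0 n 1).foldl
    (fun l i =>
      let val :=
        (PySem.List.pyRange i n 1).foldl
          (fun val j =>
            let aj := PySem.List.pyGetD A j 0
            if val < aj then aj else val)
          (PySem.List.pyGetD A i 0)
      if val ∈ l then l else l ++ [val])
    []

-- ===== PORT B =====
def findMVP_alt (n : Int) (A : List Int) : List Int :=
  let st :=
    (PySem.List.pyRange (n - 1) (-1) (-1)).foldl
      (fun (p : Option Int × List Int) j =>
        let x := PySem.List.pyGetD A j 0
        match p.1 with
        | none => (some x, p.2 ++ [x])
        | some c => if x > c then (some x, p.2 ++ [x]) else p)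
      (none, [])
  st.2.reverse

-- ===== PRECONDITION & SPEC =====
-- A indexes A[i] for every i in range(0, n), so it raises IndexError iff n > len(A).
def Pre_findMVP (n : Int) (A : List Int) : Prop := n ≤ (A.length : Int)
instance (n : Int) (A : List Int) : Decidable (Pre_findMVP n A) := by unfold Pre_findMVP; infer_instance
def pvWitness_findMVP : Int × List Int := (3, [2, 5, 1])

def Spec_findMVP (n : Int) (A : List Int) (out : List Int) : Prop := out = findMVP_alt n A
instance (n : Int) (A : List Int) (out : List Int) : Decidable (Spec_findMVP n A out) := by unfold Spec_findMVP; infer_instance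

-- ===== CLAIM (what is proved, stated in full; the proofs are below) =====
def Claim_equal_findMVP : Prop := ∀ (n : Int) (A : List Int), Dom_findMVP n A → Pre_findMVP n A → Spec_findMVP n A (findMVP n A)

-- ===== LEMMAS AND PROOFS =====

-- Structural model of A's loops over the prefix L = A[:n].
def maxAcc (v : Int) (xs : List Int) : Int :=
  xs.foldl (fun val a => if val < a then a else val) v

def aLoop : List Int → List Int → List Int
  | [], l => l
  | x :: xs, l =>
      aLoop xs (let v := maxAcc x xs; if v ∈ l then l else l ++ [v])

-- Structural model of B: the strictly decreasing list of right-to-left records.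
def bRec : List Int → List Int
  | [] => []
  | x :: xs =>
      match bRec xs with
      | [] => [x]
      | y :: ys => if y < x then x :: y :: ys else y :: ys

def bStep (p : Option Int × List Int) (x : Int) : Option Int × List Int :=
  match p.1 with
  | none => (some x, p.2 ++ [x])
  | some c => if x > c then (some x, p.2 ++ [x]) else p

theorem maxAcc_if_eq_max (v : Int) (xs : List Int) :
    maxAcc v xs = xs.foldl max v := by
  unfold maxAcc
  congr 1
  funext a b
  simp [max_def]
  omega

theorem foldl_max_max (xs : List Int) : ∀ (x y : Int),
    xs.foldl max (max x y) = max x (xs.foldl max y) := by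
  induction xs with
  | nil => intro x y; simp
  | cons a t ih =>
      intro x y
      simp only [List.foldl_cons, max_assoc]
      exact ih x (max y a)

theorem maxAcc_cons (x z : Int) (zs : List Int) :
    maxAcc x (z :: zs) = max x (maxAcc z zs) := by
  simp only [maxAcc_if_eq_max, List.foldl_cons]
  have := foldl_max_max zs x z
  simpa using this

theorem bRec_cons_nil (x : Int) (xs : List Int) (h : bRec xs = []) :
    bRec (x :: xs) = [x] := by
  show (match bRec xs with
        | [] => [x]
        | y :: ys => if y < x then x :: y :: ys else y :: ys) = [x]
  rw [h]

theorem bRec_cons_cons (x : Int) (xs : List Int) (y : Int) (ys : List Int)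
    (h : bRec xs = y :: ys) :
    bRec (x :: xs) = if y < x then x :: y :: ys else y :: ys := by
  show (match bRec xs with
        | [] => [x]
        | y :: ys => if y < x then x :: y :: ys else y :: ys)
      = if y < x then x :: y :: ys else y :: ys
  rw [h]

theorem bRec_head? : ∀ (x : Int) (xs : List Int),
    (bRec (x :: xs)).head? = some (maxAcc x xs) := by
  intro x xs
  induction xs generalizing x with
  | nil => simp [bRec, maxAcc]
  | cons z zs ih =>
      have hz := ih z
      rw [maxAcc_cons]
      rcases h : bRec (z :: zs) with _ | ⟨y, ys⟩
      · rw [h] at hz; simp at hz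
      · rw [h] at hz
        simp only [List.head?_cons, Option.some.injEq] at hz
        rw [bRec_cons_cons x (z :: zs) y ys h]
        by_cases hlt : y < x
        · simp only [if_pos hlt, List.head?_cons, Option.some.injEq]
          rw [← hz]
          exact (max_eq_left (le_of_lt hlt)).symm
        · simp only [if_neg hlt, List.head?_cons, Option.some.injEq]
          rw [← hz]
          exact (max_eq_right (not_lt.mp hlt)).symm

theorem bRec_pairwise : ∀ (L : List Int), (bRec L).Pairwise (fun a b => b < a) := by
  intro L
  induction L with
  | nil => simp [bRec]
  | cons x xs ih =>
      rcases h : bRec xs with _ | ⟨y, ys⟩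
      · rw [bRec_cons_nil x xs h]; simp
      · rw [h] at ih
        rw [bRec_cons_cons x xs y ys h]
        by_cases hlt : y < x
        · rw [if_pos hlt]
          refine List.Pairwise.cons ?_ ih
          intro b hb
          rcases List.mem_cons.mp hb with rfl | hb
          · omega
          · have := (List.pairwise_cons.mp ih).1 b hb
            omega
        · rw [if_neg hlt]; exact ih

theorem bRec_le_head : ∀ (x : Int) (xs : List Int) (b : Int),
    b ∈ bRec (x :: xs) → b ≤ maxAcc x xs := by
  intro x xs b hb
  have hh := bRec_head? x xs
  rcases hL : bRec (x :: xs) with _ | ⟨h, t⟩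
  · rw [hL] at hb; simp at hb
  · rw [hL] at hh hb
    simp only [List.head?_cons, Option.some.injEq] at hh
    rcases List.mem_cons.mp hb with rfl | hb
    · omega
    · have hp := bRec_pairwise (x :: xs)
      rw [hL] at hp
      have := (List.pairwise_cons.mp hp).1 b hb
      omega

theorem bRec_nil_iff : ∀ (L : List Int), bRec L = [] ↔ L = [] := by
  intro L
  cases L with
  | nil => simp [bRec]
  | cons x xs =>
      rcases h : bRec xs with _ | ⟨y, ys⟩
      · rw [bRec_cons_nil x xs h]; simp
      · rw [bRec_cons_cons x xs y ys h]
        split <;> simp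

-- head is not in the tail of bRec (strict decrease), used to push filters through.
theorem filter_tail_eq (v : Int) (t l : List Int) (hv : ∀ b ∈ t, b ≠ v) :
    t.filter (fun b => decide (¬ b ∈ l ++ [v])) = t.filter (fun b => decide (¬ b ∈ l)) := by
  apply List.filter_congr
  intro b hb
  have := hv b hb
  simp [this]

-- Core: A's dedup loop produces exactly the not-yet-seen records of B.
theorem aLoop_eq : ∀ (L l : List Int),
    aLoop L l = l ++ (bRec L).filter (fun b => decide (¬ b ∈ l)) := by
  intro L
  induction L with
  | nil => intro l; simp [aLoop, bRec]
  | cons x xs ih =>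
      intro l
      show aLoop xs (if maxAcc x xs ∈ l then l else l ++ [maxAcc x xs]) = _
      rcases hxs : xs with _ | ⟨z, zs⟩
      · subst hxs
        have hvx : maxAcc x [] = x := rfl
        rw [bRec_cons_nil x [] rfl, hvx]
        by_cases hmem : x ∈ l <;>
          simp [aLoop, hmem]
      · rw [← hxs]
        have hne : xs ≠ [] := by simp [hxs]
        obtain ⟨y, ys, hbr⟩ : ∃ y ys, bRec xs = y :: ys := by
          rcases h : bRec xs with _ | ⟨y, ys⟩
          · exact absurd ((bRec_nil_iff xs).mp h) hne
          · exact ⟨y, ys, rfl⟩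
        have hy : y = maxAcc z zs := by
          have := bRec_head? z zs
          rw [← hxs, hbr] at this
          simp only [List.head?_cons, Option.some.injEq] at this
          exact this
        have hvmax : maxAcc x xs = max x y := by
          rw [hxs, maxAcc_cons, ← hy]
        have hbx := bRec_cons_cons x xs y ys hbr
        by_cases hlt : y < x
        · -- new record: maxAcc = x, bRec (x::xs) = x :: bRec xs
          have hvx : maxAcc x xs = x := by
            rw [hvmax]; exact max_eq_left (le_of_lt hlt)
          have hxt : ∀ b ∈ bRec xs, b ≠ x := by
            intro b hb
            have : b ≤ maxAcc z zs := by
              rw [hxs] at hb; exact bRec_le_head z zs b hb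
            omega
          rw [hvx, hbx, if_pos hlt, ← hbr, ih]
          by_cases hmem : x ∈ l
          · rw [if_pos hmem]
            simp [hmem]
          · rw [if_neg hmem, filter_tail_eq x (bRec xs) l hxt]
            simp [hmem]
        · -- old record: maxAcc = y = head of bRec xs, bRec (x::xs) = bRec xs
          have hvy : maxAcc x xs = y := by
            rw [hvmax]; exact max_eq_right (not_lt.mp hlt)
          have hyt : ∀ b ∈ ys, b ≠ y := by
            intro b hb
            have hp := bRec_pairwise xs
            rw [hbr] at hp
            have := (List.pairwise_cons.mp hp).1 b hb
            omega
          rw [hvy, hbx, if_neg hlt, ← hbr, ih]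
          by_cases hmem : y ∈ l
          · rw [if_pos hmem]
          · rw [if_neg hmem, hbr]
            simp only [List.filter_cons]
            rw [filter_tail_eq y ys l hyt]
            simp [hmem]

theorem foldr_bStep (L : List Int) :
    L.foldr (fun x p => bStep p x) (none, []) = ((bRec L).head?, (bRec L).reverse) := by
  induction L with
  | nil => simp [bRec]
  | cons x xs ih =>
      simp only [List.foldr_cons, ih]
      rcases h : bRec xs with _ | ⟨y, ys⟩
      · have hxs := (bRec_nil_iff xs).mp h
        subst hxs
        simp [bStep, bRec]
      · rw [bRec_cons_cons x xs y ys h]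
        by_cases hlt : y < x
        · simp [bStep, gt_iff_lt, hlt]
        · simp [bStep, gt_iff_lt, hlt]

-- ---- bridging the ports to the structural models over L = A.take n.toNat ----

theorem pyGetD_take (A : List Int) (n : Int) (j : Int)
    (h0 : 0 ≤ j) (hj : j < n) (hn : n ≤ (A.length : Int)) :
    PySem.List.pyGetD A j 0 = PySem.List.pyGetD (A.take n.toNat) j 0 := by
  have hlen : j.toNat < (A.take n.toNat).length := by
    simp [List.length_take]; omega
  rw [PySem.List.pyGetD_eq_getElem A 0 h0 (by omega),
      PySem.List.pyGetD_eq_getElem (A.take n.toNat) 0 h0 (by simp [List.length_take]; omega)]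
  simp [List.getElem_take]

theorem inner_fold_eq (A : List Int) (n i : Int) (hi : 0 ≤ i) (hn : n ≤ (A.length : Int))
    (x : Int) (xs : List Int) (hdrop : (A.take n.toNat).drop i.toNat = x :: xs) (hin : i < n) :
    (PySem.List.pyRange i n 1).foldl
      (fun val j =>
        let aj := PySem.List.pyGetD A j 0
        if val < aj then aj else val)
      (PySem.List.pyGetD A i 0) = maxAcc x xs := by
  have hcong : (PySem.List.pyRange i n 1).foldl
      (fun val j =>
        let aj := PySem.List.pyGetD A j 0
        if val < aj then aj else val)
      (PySem.List.pyGetD A i 0)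
      = (PySem.List.pyRange i n 1).foldl
      (fun val j =>
        if val < PySem.List.pyGetD (A.take n.toNat) j 0
        then PySem.List.pyGetD (A.take n.toNat) j 0 else val)
      (PySem.List.pyGetD (A.take n.toNat) i 0) := by
    rw [pyGetD_take A n i hi hin hn]
    apply PySem.List.foldl_congr_mem
    intro acc j hj
    have hmem := PySem.List.mem_pyRange_one.mp hj
    rw [pyGetD_take A n j (le_trans hi hmem.1) hmem.2 hn]
  rw [hcong]
  set L := A.take n.toNat with hL
  have hlen : ((L.length : Int)) = n := by
    rw [hL]; simp [List.length_take]; omega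
  rw [← hlen,
      PySem.List.foldl_pyRange_pyGetD' L 0
        (fun val aj => if val < aj then aj else val)
        (PySem.List.pyGetD L i 0) hi]
  have hx : PySem.List.pyGetD L i 0 = x := by
    rw [PySem.List.pyGetD_of_nonneg L 0 hi, List.getD_eq_getElem?_getD]
    have h' : L[i.toNat]? = some x := by
      have hd : (L.drop i.toNat)[0]? = L[i.toNat + 0]? := List.getElem?_drop
      rw [hdrop] at hd
      simpa using hd.symm
    simp [h']
  rw [hdrop, hx]
  simp only [List.foldl_cons]
  rw [if_neg (lt_irrefl x)]
  rfl

theorem outer_fold_eq (A : List Int) (n : Int) (hn : n ≤ (A.length : Int)) :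
    ∀ (s : List Int) (a : Int) (l : List Int), 0 ≤ a →
      s = (A.take n.toNat).drop a.toNat → (a : Int) + s.length = n →
      (PySem.List.pyRange a n 1).foldl
        (fun l i =>
          let val :=
            (PySem.List.pyRange i n 1).foldl
              (fun val j =>
                let aj := PySem.List.pyGetD A j 0
                if val < aj then aj else val)
              (PySem.List.pyGetD A i 0)
          if val ∈ l then l else l ++ [val])
        l = aLoop s l := by
  intro s
  induction s with
  | nil =>
      intro a l ha hdrop hsum
      simp at hsum
      rw [PySem.List.pyRange_one_eq_nil (by omega)]
      simp [aLoop]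
  | cons x xs ih =>
      intro a l ha hdrop hsum
      have hlt : a < n := by simp at hsum; omega
      rw [PySem.List.pyRange_one_cons hlt]
      simp only [List.foldl_cons]
      rw [inner_fold_eq A n a ha hn x xs hdrop.symm hlt]
      have hdrop' : xs = (A.take n.toNat).drop (a + 1).toNat := by
        have h1 : (a + 1).toNat = a.toNat + 1 := by omega
        have h2 := congrArg (List.drop 1) hdrop
        simp only [List.drop_drop] at h2
        rw [h1]
        simpa using h2
      rw [ih (a + 1) _ (by omega) hdrop' (by simp at hsum ⊢; omega)]
      rfl

theorem findMVP_eq_aLoop (n : Int) (A : List Int) (hn : n ≤ (A.length : Int)) (h0 : 0 ≤ n) :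
    findMVP n A = aLoop (A.take n.toNat) [] := by
  unfold findMVP
  exact outer_fold_eq A n hn (A.take n.toNat) 0 [] le_rfl (by simp) (by simp; omega)

theorem findMVP_alt_eq_bRec (n : Int) (A : List Int) (hn : n ≤ (A.length : Int)) (h0 : 0 ≤ n) :
    findMVP_alt n A = bRec (A.take n.toNat) := by
  unfold findMVP_alt
  set L := A.take n.toNat with hL
  have hlen : (L.length : Int) = n := by
    rw [hL]; simp [List.length_take]; omega
  have hrange : PySem.List.pyRange (n - 1) (-1) (-1) = (PySem.List.pyRange 0 n 1).reverse := by
    have := PySem.List.pyRange_neg_one_eq_reverse (n - 1) (-1)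
    simpa using this
  rw [hrange]
  have hcong :
      (PySem.List.pyRange 0 n 1).reverse.foldl
        (fun (p : Option Int × List Int) j =>
          let x := PySem.List.pyGetD A j 0
          match p.1 with
          | none => (some x, p.2 ++ [x])
          | some c => if x > c then (some x, p.2 ++ [x]) else p)
        (none, [])
      = (PySem.List.pyRange 0 n 1).reverse.foldl
        (fun (p : Option Int × List Int) j => bStep p (PySem.List.pyGetD L j 0))
        (none, []) := by
    apply PySem.List.foldl_congr_mem
    intro acc j hj
    rw [List.mem_reverse] at hj
    have := PySem.List.mem_pyRange_one.mp hj
    rw [pyGetD_take A n j this.1 this.2 hn]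
    rfl
  rw [hcong, List.foldl_reverse]
  have hmap : (PySem.List.pyRange 0 n 1).map (fun j => PySem.List.pyGetD L j 0) = L := by
    rw [← hlen]
    exact PySem.List.map_pyGetD_pyRange_zero' L 0
  have : (PySem.List.pyRange 0 n 1).foldr
      (fun j (p : Option Int × List Int) => bStep p (PySem.List.pyGetD L j 0)) (none, [])
      = L.foldr (fun x p => bStep p x) (none, []) := by
    conv_rhs => rw [← hmap]
    rw [List.foldr_map]
  rw [this, foldr_bStep]
  simp

-- ===== VERDICT (by name: the statement is the Claim_ definition above) =====
theorem findMVP_spec : Claim_equal_findMVP := by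
  intro n A _hDom hPre
  unfold Spec_findMVP
  by_cases h0 : 0 ≤ n
  · rw [findMVP_eq_aLoop n A hPre h0, findMVP_alt_eq_bRec n A hPre h0, aLoop_eq]
    simp
  · unfold findMVP findMVP_alt
    rw [PySem.List.pyRange_one_eq_nil (by omega),
        PySem.List.pyRange_neg_one_eq_nil (by omega)]
    simp
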